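-- pv_equiv track=rewrite | github.com/skdreier/religion-politics | sampling_religious_captures_without_pig/merge_snippets_that_should_have_been_together.py | get_starting_ind_of_last_religious_match_in_text
-- ===== SOURCE A (Python) =====
-- def get_starting_ind_of_last_religious_match_in_text(text, list_of_terms):
--     next_inds_of_words_looking_for = [len(word) - 1 for word in list_of_terms]
--     for i in range(len(text) - 1, -1, -1):
--         cur_char = text[i]
--         for j in range(len(list_of_terms)):
--             if next_inds_of_words_looking_for[j] == len(list_of_terms[j]) - 1:
--                 if cur_char == list_of_terms[j][-1] and (i == len(text) - 1 or not text[i + 1].isalpha()):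
--                     next_inds_of_words_looking_for[j] -= 1
--             elif next_inds_of_words_looking_for[j] >= 0:
--                 if cur_char == list_of_terms[j][next_inds_of_words_looking_for[j]]:
--                     next_inds_of_words_looking_for[j] -= 1
--                 else:
--                     next_inds_of_words_looking_for[j] = len(list_of_terms[j]) - 1  # wasn't actually a match
--             else:  # if next_inds_of_words_looking_for[j] == len(list_of_terms[j]):
--                 if not cur_char.isalpha():
--                     return i + 1  # we found our first match!
--                 else:
--                     next_inds_of_words_looking_for[j] = len(list_of_terms[j]) - 1  # wasn't actually a match
--
--     for j in range(len(list_of_terms)):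
--         if next_inds_of_words_looking_for[j] == -1:
--             return 0
--
--     return None
-- ===== SOURCE B (Python) =====
-- def _last_match_start(text, term):
--     # starting index of the term's last boundary-delimited match, per the
--     # original right-to-left matcher; empty terms never match
--     if not term:
--         return None
--     k = len(term) - 1  # next index of term still to match
--     n = len(text)
--     for i in range(n - 1, -1, -1):
--         c = text[i]
--         if k == len(term) - 1:
--             if c == term[-1] and (i == n - 1 or not text[i + 1].isalpha()):
--                 k -= 1
--         elif k >= 0:
--             if c == term[k]:
--                 k -= 1
--             else:
--                 k = len(term) - 1
--         else:
--             if not c.isalpha():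
--                 return i + 1
--             k = len(term) - 1
--     return 0 if k == -1 else None
--
-- def get_starting_ind_of_last_religious_match_in_text(text, list_of_terms):
--     best = None
--     for term in list_of_terms:
--         r = _last_match_start(text, term)
--         if r is not None and (best is None or r > best):
--             best = r
--     return best
-- ===== Notes on version B (the rewrite author's own statement) =====
-- stated objective: alternative
-- what changed: A runs one shared right-to-left scan over the text, maintaining a mutable state array for all terms with an early return at the first completed boundary match; B decomposes the problem into an independent per-term matcher (same quirky state machine, one term at a time) and combines the per-term results by taking the maximum non-None starting index with a best-so-far accumulator. (Where A raises IndexError — an empty term with nonempty text — B simply skips the empty term; excluded by Pre_.)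
-- outside the precondition, e.g. on get_starting_ind_of_last_religious_match_in_text('', ['']): A returns 0, B returns None
import Mathlib
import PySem

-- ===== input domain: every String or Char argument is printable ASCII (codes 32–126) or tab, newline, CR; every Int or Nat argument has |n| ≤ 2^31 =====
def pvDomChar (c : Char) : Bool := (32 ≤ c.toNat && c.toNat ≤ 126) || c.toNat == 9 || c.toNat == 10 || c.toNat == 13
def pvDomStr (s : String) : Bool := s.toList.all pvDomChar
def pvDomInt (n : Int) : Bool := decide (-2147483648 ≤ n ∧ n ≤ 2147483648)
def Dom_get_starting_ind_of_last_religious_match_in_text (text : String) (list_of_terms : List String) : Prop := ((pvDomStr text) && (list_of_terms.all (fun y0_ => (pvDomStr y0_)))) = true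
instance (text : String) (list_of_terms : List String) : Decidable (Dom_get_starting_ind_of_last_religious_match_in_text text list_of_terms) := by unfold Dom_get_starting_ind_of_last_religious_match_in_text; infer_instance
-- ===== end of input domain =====

-- B re-decomposes A's shared multi-term backward scan into an independent per-term matcher
-- combined by a best-so-far maximum; equivalence of the return values is proved on Pre_ below.

-- ===== PORT A =====
-- One pass of A's inner `for j` loop over the remaining (term, state) pairs at text index i;
-- `.inl r` is Python's early `return r`, `.inr pairs'` the updated states.
-- Python evaluates term[-1] in the first branch: for an empty term it raises IndexError
-- (excluded by Pre_ below); `getLastD ' '` here is only reached on nonempty terms inside Pre_.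
def pvAInner (cs : List Char) (n : Nat) (i : Nat) : List (List Char × Int) → Sum Int (List (List Char × Int))
  | [] => .inr []
  | (term, st) :: rest =>
    if st == (term.length : Int) - 1 then
      match pvAInner cs n i rest with
      | .inl r => .inl r
      | .inr rs => .inr ((term, if cs.getD i ' ' == term.getLastD ' ' &&
          (i == n - 1 || !(PySem.Chars.isalpha (cs.getD (i + 1) ' '))) then st - 1 else st) :: rs)
    else if st ≥ 0 then
      match pvAInner cs n i rest with
      | .inl r => .inl r
      | .inr rs => .inr ((term, if cs.getD i ' ' == (PySem.List.pyGet? term st).getD ' '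
          then st - 1 else (term.length : Int) - 1) :: rs)
    else
      if !(PySem.Chars.isalpha (cs.getD i ' ')) then .inl ((i : Int) + 1)   -- we found our first match!
      else
        match pvAInner cs n i rest with
        | .inl r => .inl r
        | .inr rs => .inr ((term, (term.length : Int) - 1) :: rs)

-- A's outer `for i in range(len(text)-1, -1, -1)` loop; fuel = i + 1, so index i is processed;
-- at fuel 0 the trailing `for j` loop returning 0 on a state of -1, else None.
def pvALoop (cs : List Char) (n : Nat) : Nat → List (List Char × Int) → Option Int
  | 0, pairs => if pairs.any (fun p => p.2 == -1) then some 0 else none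
  | i + 1, pairs =>
    match pvAInner cs n i pairs with
    | .inl r => some r
    | .inr pairs' => pvALoop cs n i pairs'

def get_starting_ind_of_last_religious_match_in_text (text : String) (list_of_terms : List String) : Option Int :=
  let cs := text.toList
  pvALoop cs cs.length cs.length
    (list_of_terms.map (fun word => (word.toList, (word.toList.length : Int) - 1)))

-- ===== PORT B =====
-- B's per-term matcher loop (`for i in range(n-1, -1, -1)` in _last_match_start); fuel = i + 1.
def pvBLoop (cs : List Char) (n : Nat) (term : List Char) : Nat → Int → Option Int
  | 0, k => if k == -1 then some 0 else none
  | i + 1, k =>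
    if k == (term.length : Int) - 1 then
      pvBLoop cs n term i
        (if cs.getD i ' ' == term.getLastD ' ' &&
            (i == n - 1 || !(PySem.Chars.isalpha (cs.getD (i + 1) ' '))) then k - 1 else k)
    else if k ≥ 0 then
      pvBLoop cs n term i
        (if cs.getD i ' ' == (PySem.List.pyGet? term k).getD ' ' then k - 1 else (term.length : Int) - 1)
    else if !(PySem.Chars.isalpha (cs.getD i ' ')) then some ((i : Int) + 1)
    else pvBLoop cs n term i ((term.length : Int) - 1)

-- B's helper _last_match_start: empty terms never match.
def pvLastMatchStart (cs : List Char) (term : List Char) : Option Int :=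
  if term = [] then none
  else pvBLoop cs cs.length term cs.length ((term.length : Int) - 1)

-- B's `if r is not None and (best is None or r > best): best = r`.
def pvBest (best : Option Int) (r : Option Int) : Option Int :=
  match r with
  | none => best
  | some v =>
    match best with
    | none => some v
    | some b => if v > b then some v else some b

def get_starting_ind_of_last_religious_match_in_text_alt (text : String) (list_of_terms : List String) : Option Int :=
  list_of_terms.foldl (fun best term => pvBest best (pvLastMatchStart text.toList term.toList)) none

-- ===== PRECONDITION & SPEC =====
-- Pre_ excludes term lists containing the empty string: on them A raises IndexError (it
-- evaluates term[-1]) whenever the text is nonempty, and on empty text A returns 0 — an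
-- accidental "match" of the empty term that B's helper, treating the empty term as never
-- matching, does not reproduce (there B returns the best index among the other terms).
def Pre_get_starting_ind_of_last_religious_match_in_text (_text : String) (list_of_terms : List String) : Prop :=
  "" ∉ list_of_terms
instance (text : String) (list_of_terms : List String) : Decidable (Pre_get_starting_ind_of_last_religious_match_in_text text list_of_terms) := by unfold Pre_get_starting_ind_of_last_religious_match_in_text; infer_instance

def pvWitness_get_starting_ind_of_last_religious_match_in_text : String × List String := ("no god here", ["god", "kirk"])

def Spec_get_starting_ind_of_last_religious_match_in_text (text : String) (list_of_terms : List String) (out : Option Int) : Prop := out = get_starting_ind_of_last_religious_match_in_text_alt text list_of_terms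
instance (text : String) (list_of_terms : List String) (out : Option Int) : Decidable (Spec_get_starting_ind_of_last_religious_match_in_text text list_of_terms out) := by unfold Spec_get_starting_ind_of_last_religious_match_in_text; infer_instance

-- ===== CLAIM (what is proved, stated in full; the proofs are below) =====
def Claim_equal_get_starting_ind_of_last_religious_match_in_text : Prop := ∀ (text : String) (list_of_terms : List String), Dom_get_starting_ind_of_last_religious_match_in_text text list_of_terms → Pre_get_starting_ind_of_last_religious_match_in_text text list_of_terms → Spec_get_starting_ind_of_last_religious_match_in_text text list_of_terms (get_starting_ind_of_last_religious_match_in_text text list_of_terms)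

-- ===== LEMMAS AND PROOFS =====

-- Any value B's per-term loop returns from fuel i is at most i.
lemma pvBLoop_le (cs : List Char) (n : Nat) (term : List Char) :
    ∀ (i : Nat) (k : Int) (v : Int), pvBLoop cs n term i k = some v → v ≤ (i : Int) := by
  intro i
  induction i with
  | zero =>
    intro k v h
    simp only [pvBLoop] at h
    split at h <;> simp_all
  | succ i ih =>
    intro k v h
    simp only [pvBLoop] at h
    split at h
    · exact le_trans (ih _ _ h) (by push_cast; omega)
    · split at h
      · exact le_trans (ih _ _ h) (by push_cast; omega)
      · split at h
        · simp only [Option.some.injEq] at h; omega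
        · exact le_trans (ih _ _ h) (by push_cast; omega)

-- When A's inner pass does not return, each pair's per-term loop takes exactly one step.
lemma pvAInner_inr (cs : List Char) (n : Nat) (i : Nat) :
    ∀ (pairs pairs' : List (List Char × Int)), pvAInner cs n i pairs = .inr pairs' →
      pairs.map (fun p => pvBLoop cs n p.1 (i + 1) p.2) =
      pairs'.map (fun p => pvBLoop cs n p.1 i p.2) := by
  intro pairs
  induction pairs with
  | nil => intro pairs' h; simp only [pvAInner] at h; cases h; simp
  | cons hd tl ih =>
    intro pairs' h
    obtain ⟨term, st⟩ := hd
    simp only [pvAInner] at h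
    split at h
    · rename_i hc1
      cases heq : pvAInner cs n i tl with
      | inl r => rw [heq] at h; cases h
      | inr rs =>
        rw [heq] at h; cases h
        simp only [List.map_cons]
        rw [ih rs heq]
        congr 1
        conv_lhs => rw [pvBLoop]
        rw [if_pos hc1]
    · rename_i hc1
      split at h
      · rename_i hc2
        cases heq : pvAInner cs n i tl with
        | inl r => rw [heq] at h; cases h
        | inr rs =>
          rw [heq] at h; cases h
          simp only [List.map_cons]
          rw [ih rs heq]
          congr 1
          conv_lhs => rw [pvBLoop]
          rw [if_neg hc1, if_pos hc2]
      · rename_i hc2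
        split at h
        · cases h
        · rename_i hc3
          cases heq : pvAInner cs n i tl with
          | inl r => rw [heq] at h; cases h
          | inr rs =>
            rw [heq] at h; cases h
            simp only [List.map_cons]
            rw [ih rs heq]
            congr 1
            conv_lhs => rw [pvBLoop]
            rw [if_neg hc1, if_neg hc2, if_neg hc3]

-- When A's inner pass returns, it returns i+1 and some pair's per-term loop returns i+1 too.
lemma pvAInner_inl (cs : List Char) (n : Nat) (i : Nat) :
    ∀ (pairs : List (List Char × Int)) (r : Int), pvAInner cs n i pairs = .inl r →
      r = (i : Int) + 1 ∧ some ((i : Int) + 1) ∈ pairs.map (fun p => pvBLoop cs n p.1 (i + 1) p.2) := by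
  intro pairs
  induction pairs with
  | nil => intro r h; simp [pvAInner] at h
  | cons hd tl ih =>
    intro r h
    obtain ⟨term, st⟩ := hd
    simp only [pvAInner] at h
    split at h
    · cases heq : pvAInner cs n i tl with
      | inl r' =>
        rw [heq] at h; cases h
        obtain ⟨h1, h2⟩ := ih r heq
        exact ⟨h1, by simp [h2]⟩
      | inr rs => rw [heq] at h; cases h
    · rename_i hc1
      split at h
      · cases heq : pvAInner cs n i tl with
        | inl r' =>
          rw [heq] at h; cases h
          obtain ⟨h1, h2⟩ := ih r heq
          exact ⟨h1, by simp [h2]⟩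
        | inr rs => rw [heq] at h; cases h
      · rename_i hc2
        split at h
        · rename_i hc3
          cases h
          refine ⟨rfl, ?_⟩
          simp only [List.map_cons, List.mem_cons]
          left
          conv_rhs => rw [pvBLoop]
          rw [if_neg hc1, if_neg hc2, if_pos hc3]
        · cases heq : pvAInner cs n i tl with
          | inl r' =>
            rw [heq] at h; cases h
            obtain ⟨h1, h2⟩ := ih r heq
            exact ⟨h1, by simp [h2]⟩
          | inr rs => rw [heq] at h; cases h

-- Folding pvBest yields some m when some element is some m and everything is bounded by m.
lemma foldl_pvBest_eq_some (m : Int) :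
    ∀ (rs : List (Option Int)) (acc : Option Int),
      some m ∈ rs → (∀ r ∈ rs, ∀ v, r = some v → v ≤ m) → (∀ v, acc = some v → v ≤ m) →
      rs.foldl pvBest acc = some m := by
  intro rs
  induction rs with
  | nil => intro acc h; simp at h
  | cons hd tl ih =>
    intro acc hmem hbd hacc
    simp only [List.foldl_cons]
    rcases List.mem_cons.mp hmem with h | h
    · subst h
      by_cases htl : some m ∈ tl
      · exact ih _ htl (fun r hr => hbd r (List.mem_cons_of_mem _ hr)) (by
          intro v hv
          simp only [pvBest] at hv
          cases acc with
          | none => simp_all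
          | some b =>
            have hb : b ≤ m := hacc b rfl
            simp only at hv
            split at hv <;> simp_all)
      · -- m stays the accumulator through the tail
        have : ∀ (l : List (Option Int)) (a : Int), (∀ r ∈ l, ∀ v, r = some v → v ≤ a) →
            l.foldl pvBest (some a) = some a := by
          intro l
          induction l with
          | nil => intro a _; rfl
          | cons x xs ihx =>
            intro a hb
            simp only [List.foldl_cons]
            have hx : pvBest (some a) x = some a := by
              cases x with
              | none => rfl
              | some v =>
                have := hb _ (List.mem_cons_self) v rfl
                simp only [pvBest]
                rw [if_neg (by omega)]
            rw [hx]
            exact ihx a (fun r hr => hb r (List.mem_cons_of_mem _ hr))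
        have hacc' : pvBest acc (some m) = some m := by
          cases acc with
          | none => rfl
          | some b =>
            have hb : b ≤ m := hacc b rfl
            simp only [pvBest]
            split <;> simp_all <;> omega
        rw [hacc']
        exact this tl m (fun r hr v hv => hbd r (List.mem_cons_of_mem _ hr) v hv)
    · refine ih _ h (fun r hr => hbd r (List.mem_cons_of_mem _ hr)) ?_
      intro v hv
      cases hd with
      | none => simp only [pvBest] at hv; exact hacc v hv
      | some w =>
        have hw : w ≤ m := hbd _ (List.mem_cons_self) w rfl
        simp only [pvBest] at hv
        cases acc with
        | none => simp_all
        | some b =>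
          have hb : b ≤ m := hacc b rfl
          simp only at hv
          split at hv <;> simp_all

-- Base case: folding pvBest over "some 0 if state = -1 else none" flags whether any state is -1.
lemma foldl_pvBest_base (cs : List Char) (n : Nat) :
    ∀ (pairs : List (List Char × Int)) (acc : Option Int), (acc = none ∨ acc = some 0) →
      pairs.foldl (fun best p => pvBest best (pvBLoop cs n p.1 0 p.2)) acc =
      (if pairs.any (fun p => p.2 == -1) then some 0 else acc) := by
  intro pairs
  induction pairs with
  | nil => intro acc _; rfl
  | cons hd tl ih =>
    intro acc hacc
    simp only [List.foldl_cons, List.any_cons]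
    by_cases h : hd.2 = -1
    · have hstep : pvBest acc (pvBLoop cs n hd.1 0 hd.2) = some 0 := by
        simp only [pvBLoop, h]
        rcases hacc with h' | h' <;> (subst h'; simp [pvBest])
      rw [hstep, ih (some 0) (Or.inr rfl)]
      simp [h]
    · have hstep : pvBest acc (pvBLoop cs n hd.1 0 hd.2) = acc := by
        simp only [pvBLoop]
        rw [if_neg (by simp [h])]
        cases acc <;> rfl
      rw [hstep, ih acc hacc]
      have hb : (hd.2 == -1) = false := by simpa using h
      simp only [hb, Bool.false_or]

-- Key invariant: A's combined scan from fuel i equals B's per-term loops folded with pvBest.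
lemma pvALoop_eq_fold (cs : List Char) (n : Nat) :
    ∀ (i : Nat) (pairs : List (List Char × Int)),
      pvALoop cs n i pairs =
      (pairs.map (fun p => pvBLoop cs n p.1 i p.2)).foldl pvBest none := by
  intro i
  induction i with
  | zero =>
    intro pairs
    simp only [List.foldl_map]
    rw [foldl_pvBest_base cs n pairs none (Or.inl rfl)]
    rfl
  | succ i ih =>
    intro pairs
    simp only [pvALoop]
    cases heq : pvAInner cs n i pairs with
    | inl r =>
      obtain ⟨h1, h2⟩ := pvAInner_inl cs n i pairs r heq
      subst h1
      refine (foldl_pvBest_eq_some ((i : Int) + 1) _ none h2 ?_ (by simp)).symm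
      intro r' hr' v hv
      obtain ⟨p, _, hp⟩ := List.mem_map.mp hr'
      subst hp
      have := pvBLoop_le cs n p.1 (i + 1) p.2 v hv
      push_cast at this ⊢
      omega
    | inr pairs' =>
      rw [pvAInner_inr cs n i pairs pairs' heq]
      exact ih pairs'

-- A nonempty string has a nonempty character list.
lemma toList_ne_nil_of_ne_empty (s : String) (h : s ≠ "") : s.toList ≠ [] := by
  intro hnil
  apply h
  have := congrArg String.ofList hnil
  simpa using this

-- ===== VERDICT (by name: the statement is the Claim_ definition above) =====
theorem get_starting_ind_of_last_religious_match_in_text_spec : Claim_equal_get_starting_ind_of_last_religious_match_in_text := by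
  intro text list_of_terms _ hpre
  show pvALoop text.toList text.toList.length text.toList.length
      (list_of_terms.map (fun word => (word.toList, (word.toList.length : Int) - 1))) =
    list_of_terms.foldl (fun best term => pvBest best (pvLastMatchStart text.toList term.toList)) none
  rw [pvALoop_eq_fold, List.map_map, List.foldl_map]
  apply PySem.List.foldl_congr_mem
  intro acc t ht
  have hne : t.toList ≠ [] := toList_ne_nil_of_ne_empty t (fun h => hpre (h ▸ ht))
  simp only [Function.comp, pvLastMatchStart]
  rw [if_neg hne]
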